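-- pv_equiv track=rewrite | github.com/Ephraim-Bryski/Py-Reflection | make_string_to_show_substitutions.py | construct_valued_expression
-- ===== SOURCE A (Python) =====
-- def construct_valued_expression(expression):
--
--     is_part_of_val = lambda char : char.isalnum() or char == "_" or char == "."
--
--     val = ""
--     new_text = ''
--
--     expression = expression.replace("**","^")
--
--     #expression += " " # allows it to append to last value
--
--     for char in expression:
--
--         if is_part_of_val(char):
--             val += char
--         else:
--             new_text += f'str({val})+'
--             new_text += f'"{char}"'
--             val = ""
--
--     new_text += f'str({val})'
--
--     new_text = new_text.replace("^","**")
--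
--     return new_text
-- ===== SOURCE B (Python) =====
-- def construct_valued_expression(expression):
--     # Different decomposition: scan maximal value-runs with a two-pointer loop,
--     # emitting one whole piece per (run, separator) chunk, then join once.
--     def is_part_of_val(char):
--         return char.isalnum() or char == "_" or char == "."
--
--     expr = expression.replace("**", "^")
--     n = len(expr)
--     pieces = []
--     i = 0
--     while True:
--         j = i
--         while j < n and is_part_of_val(expr[j]):
--             j += 1
--         if j == n:
--             pieces.append(f'str({expr[i:j]})')
--             break
--         pieces.append(f'str({expr[i:j]})+"{expr[j]}"')
--         i = j + 1
--     return "".join(pieces).replace("^", "**")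
-- ===== Notes on version B (the rewrite author's own statement) =====
-- stated objective: alternative
-- what changed: Replaced A's flat per-character loop with a mutable val accumulator by a two-pointer scan over maximal value runs that emits one whole piece per (run, separator) chunk into a list joined once at the end.
import Mathlib
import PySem

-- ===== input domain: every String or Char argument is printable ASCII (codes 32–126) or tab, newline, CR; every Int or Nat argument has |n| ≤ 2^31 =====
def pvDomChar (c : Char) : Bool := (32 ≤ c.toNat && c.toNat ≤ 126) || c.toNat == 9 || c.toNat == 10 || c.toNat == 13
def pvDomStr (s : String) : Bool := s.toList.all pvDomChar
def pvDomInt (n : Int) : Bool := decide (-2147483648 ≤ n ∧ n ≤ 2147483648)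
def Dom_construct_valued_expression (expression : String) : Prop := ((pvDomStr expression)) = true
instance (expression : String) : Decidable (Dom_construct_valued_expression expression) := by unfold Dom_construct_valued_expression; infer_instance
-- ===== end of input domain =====

-- B keeps the same output as A via a different decomposition (chunked two-pointer scan); equality of return values is proved below.

-- ===== PORT A =====
-- is_part_of_val, the same lambda in both Pythons
def pvIsVal (c : Char) : Bool := PySem.Chars.isalnum c || c == '_' || c == '.'

-- one loop step of A: state = (val, new_text)
def pvStepA (st : List Char × List Char) (c : Char) : List Char × List Char :=
  if pvIsVal c then (st.1 ++ [c], st.2)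
  else ([], st.2 ++ ("str(".toList ++ st.1 ++ ")+".toList) ++ ['"', c, '"'])

def construct_valued_expression (expression : String) : String :=
  let expr := PySem.Str.replace expression "**" "^"
  let st := expr.toList.foldl pvStepA ([], [])
  PySem.Str.replace (String.mk (st.2 ++ ("str(".toList ++ st.1 ++ [')']))) "^" "**"

-- ===== PORT B =====
-- Source B's outer while-loop: each iteration takes the maximal value run and, if present,
-- the following separator char, emitting one whole piece per chunk.
def pvChunksB (l : List Char) : List (List Char) :=
  match h : l.span pvIsVal with
  | (run, []) => ["str(".toList ++ run ++ [')']]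
  | (run, c :: r) => ("str(".toList ++ run ++ (")+".toList ++ ['"', c, '"'])) :: pvChunksB r
termination_by l.length
decreasing_by
  have hle : (l.span pvIsVal).2.length ≤ l.length := by
    simp only [List.span_eq_takeWhile_dropWhile]
    exact List.length_dropWhile_le _ _
  rw [h] at hle
  simp at hle
  omega

def construct_valued_expression_alt (expression : String) : String :=
  let expr := PySem.Str.replace expression "**" "^"
  let pieces := pvChunksB expr.toList
  PySem.Str.replace (String.mk (PySem.Chars.join [] pieces)) "^" "**"

-- ===== PRECONDITION & SPEC =====
def Spec_construct_valued_expression (expression : String) (out : String) : Prop := out = construct_valued_expression_alt expression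
instance (expression : String) (out : String) : Decidable (Spec_construct_valued_expression expression out) := by unfold Spec_construct_valued_expression; infer_instance

-- ===== CLAIM (what is proved, stated in full; the proofs are below) =====
def Claim_equal_construct_valued_expression : Prop := ∀ (expression : String), Dom_construct_valued_expression expression → Spec_construct_valued_expression expression (construct_valued_expression expression)

-- ===== LEMMAS AND PROOFS =====

-- "".join is concatenation
lemma pv_join_nil_eq_flatten (ls : List (List Char)) :
    PySem.Chars.join ([] : List Char) ls = ls.flatten := by
  induction ls with
  | nil => simp [PySem.Chars.join, List.intercalate]
  | cons x xs ih => cases xs <;> simp_all [PySem.Chars.join, List.intercalate, List.intersperse]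

-- A's fold over a pure value run just extends val
lemma pv_fold_run (run : List Char) (hrun : ∀ c ∈ run, pvIsVal c = true) :
    ∀ val acc, run.foldl pvStepA (val, acc) = (val ++ run, acc) := by
  induction run with
  | nil => intro val acc; simp
  | cons c t ih =>
    intro val acc
    have hc : pvIsVal c = true := hrun c (List.mem_cons_self ..)
    have ht : ∀ x ∈ t, pvIsVal x = true := fun x hx => hrun x (List.mem_cons_of_mem _ hx)
    simp [List.foldl_cons, pvStepA, hc, ih ht]

-- main invariant: A's fold (with empty val) followed by the final piece equals acc ++ B's chunks
lemma pv_main : ∀ n (l : List Char), l.length ≤ n → ∀ acc : List Char,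
    (l.foldl pvStepA ([], acc)).2 ++ ("str(".toList ++ (l.foldl pvStepA ([], acc)).1 ++ [')'])
      = acc ++ (pvChunksB l).flatten := by
  intro n
  induction n with
  | zero =>
    intro l hl acc
    have : l = [] := List.length_eq_zero_iff.mp (Nat.le_zero.mp hl)
    subst this
    rw [pvChunksB.eq_def]
    split <;> simp_all [List.span, List.span.loop]
  | succ n ih =>
    intro l hl acc
    have hspan : l.span pvIsVal = (l.takeWhile pvIsVal, l.dropWhile pvIsVal) :=
      List.span_eq_takeWhile_dropWhile ..
    have hsplit : l = l.takeWhile pvIsVal ++ l.dropWhile pvIsVal :=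
      (List.takeWhile_append_dropWhile (p := pvIsVal) (l := l)).symm
    have hrun : ∀ c ∈ l.takeWhile pvIsVal, pvIsVal c = true :=
      fun c hc => List.mem_takeWhile_imp hc
    cases hdrop : l.dropWhile pvIsVal with
    | nil =>
      -- l is one pure run
      have hall : ∀ c ∈ l, pvIsVal c = true := by
        have := List.dropWhile_eq_nil_iff.mp hdrop
        simpa using this
      have htake : l.takeWhile pvIsVal = l := by
        conv_rhs => rw [hsplit]
        rw [hdrop, List.append_nil]
      rw [pv_fold_run l hall, pvChunksB.eq_def]
      split
      · rename_i run heq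
        rw [hspan] at heq
        injection heq with h1 h2
        rw [← h1, htake]
        simp
      · rename_i run c r heq
        rw [hspan] at heq
        injection heq with h1 h2
        rw [hdrop] at h2
        cases h2
    | cons c r =>
      have hc : pvIsVal c = false := by
        have := List.head_dropWhile_not (p := pvIsVal) (l := l) (by simp [hdrop])
        simpa [hdrop] using this
      have hlen : r.length ≤ n := by
        have h1 : (l.takeWhile pvIsVal).length + (c :: r).length = l.length := by
          rw [← hdrop, ← List.length_append, ← hsplit]
        simp at h1; omega
      rw [pvChunksB.eq_def]
      split
      · rename_i run heq
        rw [hspan] at heq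
        injection heq with h1 h2
        rw [hdrop] at h2
        cases h2
      · rename_i run c' r' heq
        rw [hspan] at heq
        injection heq with h1 h2
        rw [hdrop] at h2
        injection h2 with hcc hrr
        subst hcc hrr
        subst h1
        conv_lhs => rw [hsplit, hdrop, List.foldl_append, pv_fold_run _ hrun, List.foldl_cons]
        have hstep : pvStepA ([] ++ l.takeWhile pvIsVal, acc) c
            = ([], acc ++ ("str(".toList ++ l.takeWhile pvIsVal ++ ")+".toList) ++ ['"', c, '"']) := by
          simp [pvStepA, hc]
        rw [hstep, ih r hlen]
        simp

-- ===== VERDICT (by name: the statement is the Claim_ definition above) =====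
theorem construct_valued_expression_spec : Claim_equal_construct_valued_expression := by
  intro expression _
  unfold Spec_construct_valued_expression construct_valued_expression construct_valued_expression_alt
  dsimp only
  rw [pv_join_nil_eq_flatten]
  have h := pv_main (PySem.Str.replace expression "**" "^").toList.length
      (PySem.Str.replace expression "**" "^").toList le_rfl []
  simp only [List.nil_append] at h
  rw [h]
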